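-- pv_equiv track=rewrite | github.com/jano31415/codejam | codeforces/global_16/probc.py | solve
-- ===== SOURCE A (Python) =====
-- def solve(s1, s2):
--     tot = 0
--     last0=False
--
--     last1= False
--     for i in range(len(s1)):
--         pair= [s1[i],s2[i]]
--         if "1" in pair and "0" in pair:
--             tot+=2
--             last0 = False
--             last1 = False
--         else:
--             if s1[i] == "1": #both 1
--                 if last0:
--                     tot+= 1
--                     last0 = False
--                     last1 = False
--                 else:
--                     last1=True
--
--             if s1[i] == "0":
--                 tot+= 1
--                 if last1:
--                     tot+=1
--                     last0 = False
--                     last1 = False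
--                 else:
--                     last1 = False
--                     last0 = True
--     return tot
-- ===== SOURCE B (Python) =====
-- def solve(s1, s2):
--     # Pass 1: classify each column; s2[i] indexed exactly as in the loop of A.
--     cols = []
--     for i in range(len(s1)):
--         a, b = s1[i], s2[i]
--         if "1" in (a, b) and "0" in (a, b):
--             cols.append('m')
--         elif a == '1':
--             cols.append('1')
--         elif a == '0':
--             cols.append('0')
--         else:
--             cols.append('.')
--     base = 2 * cols.count('m') + cols.count('0')
--     # Pass 2: one pending slot; a '1' after a pending '0' (or vice versa) scores a bonus.
--     bonus = 0
--     pending = None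
--     for c in cols:
--         if c == 'm':
--             pending = None
--         elif c == '1':
--             if pending == '0':
--                 bonus += 1
--                 pending = None
--             else:
--                 pending = '1'
--         elif c == '0':
--             if pending == '1':
--                 bonus += 1
--                 pending = None
--             else:
--                 pending = '0'
--     return base + bonus
-- ===== Notes on version B (the rewrite author's own statement) =====
-- stated objective: alternative
-- what changed: Replaces A's single stateful loop with two bool flags interleaving base points and bonuses by a two-pass decomposition: classify columns, compute the base score by counting, then a separate pending-slot scan for the bonus matches.
import Mathlib
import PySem

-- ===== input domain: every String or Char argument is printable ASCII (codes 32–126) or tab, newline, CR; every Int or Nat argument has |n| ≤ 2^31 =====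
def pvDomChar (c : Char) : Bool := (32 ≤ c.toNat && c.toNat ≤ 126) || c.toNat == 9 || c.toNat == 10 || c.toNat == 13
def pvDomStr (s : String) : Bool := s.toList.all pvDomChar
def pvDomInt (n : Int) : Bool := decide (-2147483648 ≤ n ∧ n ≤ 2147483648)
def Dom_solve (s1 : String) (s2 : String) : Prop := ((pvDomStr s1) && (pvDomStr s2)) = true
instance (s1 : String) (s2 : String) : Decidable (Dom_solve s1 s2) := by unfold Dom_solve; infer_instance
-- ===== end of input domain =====

-- B replaces A's single stateful loop (two bool flags mixing base points and bonuses)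
-- by a two-pass decomposition: classify columns, count the base score, then a separate
-- pending-slot scan for the bonus matches. Objective: alternative (same cost).


-- ===== PORT A =====
-- A's loop body; the `.getD ' '` default is unreachable under Pre_solve (Python raises IndexError there).
def aStep (s1 s2 : String) (st : Int × Bool × Bool) (i : Int) : Int × Bool × Bool :=
  match st with
  | (tot, last0, last1) =>
    let a := (PySem.Str.pyGet? s1 i).getD ' '
    let b := (PySem.Str.pyGet? s2 i).getD ' '
    if ('1' ∈ [a, b]) ∧ ('0' ∈ [a, b]) then (tot + 2, false, false)
    else
      match (if a = '1' then (if last0 then (tot + 1, false, false) else (tot, last0, true))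
             else (tot, last0, last1)) with
      | (t, l0, l1) =>
        if a = '0' then (if l1 then (t + 1 + 1, false, false) else (t + 1, true, false))
        else (t, l0, l1)

def solve (s1 : String) (s2 : String) : Int :=
  ((PySem.List.pyRange 0 (PySem.Str.len s1) 1).foldl (aStep s1 s2) (0, false, false)).1

-- ===== PORT B =====
-- Pass 1 of Source B: classify column i ('m' mixed, '1', '0', '.' neutral).
def classifyAt (s1 s2 : String) (i : Int) : Char :=
  let a := (PySem.Str.pyGet? s1 i).getD ' '
  let b := (PySem.Str.pyGet? s2 i).getD ' '
  if ('1' ∈ [a, b]) ∧ ('0' ∈ [a, b]) then 'm'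
  else if a = '1' then '1'
  else if a = '0' then '0'
  else '.'

-- Pass 2 of Source B: the pending-slot scan accumulating the bonus.
def bStep (st : Int × Option Char) (c : Char) : Int × Option Char :=
  match st with
  | (bonus, pending) =>
    if c = 'm' then (bonus, none)
    else if c = '1' then (if pending = some '0' then (bonus + 1, none) else (bonus, some '1'))
    else if c = '0' then (if pending = some '1' then (bonus + 1, none) else (bonus, some '0'))
    else (bonus, pending)

def solve_alt (s1 : String) (s2 : String) : Int :=
  let cols := (PySem.List.pyRange 0 (PySem.Str.len s1) 1).map (classifyAt s1 s2)
  let base : Int := 2 * (cols.count 'm' : Int) + (cols.count '0' : Int)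
  base + (cols.foldl bStep (0, none)).1

-- ===== PRECONDITION & SPEC =====
-- Pre_ excludes exactly the inputs where Python's s2[i] raises IndexError (s2 shorter than s1).
def Pre_solve (s1 : String) (s2 : String) : Prop := s1.toList.length ≤ s2.toList.length
instance (s1 : String) (s2 : String) : Decidable (Pre_solve s1 s2) := by unfold Pre_solve; infer_instance
def pvWitness_solve : String × String := ("1010", "0110")

def Spec_solve (s1 : String) (s2 : String) (out : Int) : Prop := out = solve_alt s1 s2
instance (s1 : String) (s2 : String) (out : Int) : Decidable (Spec_solve s1 s2 out) := by unfold Spec_solve; infer_instance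

-- ===== CLAIM (what is proved, stated in full; the proofs are below) =====
def Claim_equal_solve : Prop := ∀ (s1 : String) (s2 : String), Dom_solve s1 s2 → Pre_solve s1 s2 → Spec_solve s1 s2 (solve s1 s2)

-- ===== LEMMAS AND PROOFS =====

-- A's loop body depends only on the column's classification.
def colStep (st : Int × Bool × Bool) (c : Char) : Int × Bool × Bool :=
  match st with
  | (tot, last0, last1) =>
    if c = 'm' then (tot + 2, false, false)
    else if c = '1' then (if last0 then (tot + 1, false, false) else (tot, last0, true))
    else if c = '0' then (if last1 then (tot + 1 + 1, false, false) else (tot + 1, true, false))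
    else (tot, last0, last1)

theorem aStep_eq_colStep (s1 s2 : String) (st : Int × Bool × Bool) (i : Int) :
    aStep s1 s2 st i = colStep st (classifyAt s1 s2 i) := by
  obtain ⟨tot, last0, last1⟩ := st
  simp only [aStep, classifyAt, colStep]
  split_ifs <;> simp_all

theorem bStep_fst (b : Int) (p : Option Char) (c : Char) :
    bStep (b, p) c = (b + (bStep (0, p) c).1, (bStep (0, p) c).2) := by
  simp only [bStep]
  split_ifs <;> simp

theorem foldl_bStep_add (cols : List Char) (b : Int) (p : Option Char) :
    (cols.foldl bStep (b, p)).1 = b + (cols.foldl bStep (0, p)).1 := by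
  induction cols generalizing b p with
  | nil => simp
  | cons c cs ih =>
    simp only [List.foldl_cons]
    rw [bStep_fst, ih, ih ((bStep (0, p) c).1)]
    ring

theorem foldl_bStep_cons (c : Char) (cs : List Char) (p : Option Char) :
    (((c :: cs).foldl bStep (0, p))).1
      = (bStep (0, p) c).1 + (cs.foldl bStep (0, (bStep (0, p) c).2)).1 := by
  simp only [List.foldl_cons]
  rw [show bStep (0, p) c = ((bStep (0, p) c).1, (bStep (0, p) c).2) from (Prod.mk.eta).symm,
     foldl_bStep_add]

-- Main invariant: A's running total equals B's base contribution plus bonus, with A's two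
-- flags determined by B's pending slot.
theorem fold_inv (cols : List Char) (tot : Int) (p : Option Char) :
    (cols.foldl colStep (tot, decide (p = some '0'), decide (p = some '1'))).1
      = tot + 2 * (cols.count 'm' : Int) + (cols.count '0' : Int)
        + (cols.foldl bStep (0, p)).1 := by
  induction cols generalizing tot p with
  | nil => simp
  | cons c cs ih =>
    rw [foldl_bStep_cons]
    simp only [List.foldl_cons, List.count_cons]
    by_cases hm : c = 'm'
    · subst hm
      rw [show colStep (tot, decide (p = some '0'), decide (p = some '1')) 'm'
          = (tot + 2, decide ((none : Option Char) = some '0'), decide ((none : Option Char) = some '1')) from by simp [colStep],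
        ih (tot + 2) none]
      simp [bStep]
      ring
    · by_cases h1 : c = '1'
      · subst h1
        by_cases hp : p = some '0'
        · subst hp
          rw [show colStep (tot, decide ((some '0' : Option Char) = some '0'), decide ((some '0' : Option Char) = some '1')) '1'
              = (tot + 1, decide ((none : Option Char) = some '0'), decide ((none : Option Char) = some '1')) from by simp [colStep],
            ih (tot + 1) none]
          simp [bStep]
          ring
        · rw [show colStep (tot, decide (p = some '0'), decide (p = some '1')) '1'
              = (tot, decide ((some '1' : Option Char) = some '0'), decide ((some '1' : Option Char) = some '1')) from by simp [colStep, hp],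
            ih tot (some '1')]
          simp [bStep, hp]
      · by_cases h2 : c = '0'
        · subst h2
          by_cases hp : p = some '1'
          · subst hp
            rw [show colStep (tot, decide ((some '1' : Option Char) = some '0'), decide ((some '1' : Option Char) = some '1')) '0'
                = (tot + 1 + 1, decide ((none : Option Char) = some '0'), decide ((none : Option Char) = some '1')) from by simp [colStep],
              ih (tot + 1 + 1) none]
            simp [bStep]
            ring
          · rw [show colStep (tot, decide (p = some '0'), decide (p = some '1')) '0'
                = (tot + 1, decide ((some '0' : Option Char) = some '0'), decide ((some '0' : Option Char) = some '1')) from by simp [colStep, hp],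
              ih (tot + 1) (some '0')]
            simp [bStep, hp]
            ring
        · rw [show colStep (tot, decide (p = some '0'), decide (p = some '1')) c
              = (tot, decide (p = some '0'), decide (p = some '1')) from by simp [colStep, hm, h1, h2],
            ih tot p]
          simp [bStep, hm, h1, h2]

-- ===== VERDICT (by name: the statement is the Claim_ definition above) =====
theorem solve_spec : Claim_equal_solve := by
  intro s1 s2 _ _
  show solve s1 s2 = solve_alt s1 s2
  have hA : solve s1 s2
      = (((PySem.List.pyRange 0 (PySem.Str.len s1) 1).map (classifyAt s1 s2)).foldl colStep
          (0, false, false)).1 := by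
    unfold solve
    have hf : (fun (st : Int × Bool × Bool) i => colStep st (classifyAt s1 s2 i)) = aStep s1 s2 := by
      funext st i
      exact (aStep_eq_colStep s1 s2 st i).symm
    rw [List.foldl_map, hf]
  rw [hA,
    show ((0 : Int), false, false)
      = ((0 : Int), decide ((none : Option Char) = some '0'), decide ((none : Option Char) = some '1')) from rfl,
    fold_inv]
  simp only [solve_alt]
  ring
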